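-- pv_equiv track=rewrite | github.com/olefire/kubsu-python-course | lab1/task15-19/functions/func5.py | func
-- ===== SOURCE A (Python) =====
-- from typing import List
--
-- def func(nums: List[int]) -> int:
--     count = 0
--     curr_sum = 0
--
--     for num in nums:
--         if num > curr_sum:
--             count += 1
--         curr_sum += num
--
--     return count
-- ===== SOURCE B (Python) =====
-- from typing import List
--
-- def func(nums: List[int]) -> int:
--     # Two-pass decomposition: build the prefix-sum table, then count in a separate scan.
--     prefix = [0]
--     for num in nums:
--         prefix.append(prefix[-1] + num)
--     return sum(1 for p, num in zip(prefix, nums) if num > p)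
-- ===== Notes on version B (the rewrite author's own statement) =====
-- stated objective: alternative
-- what changed: Replaced the fused running-sum-and-count loop with a build-the-prefix-sum-table pass followed by a separate zip-and-count pass.
import Mathlib
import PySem

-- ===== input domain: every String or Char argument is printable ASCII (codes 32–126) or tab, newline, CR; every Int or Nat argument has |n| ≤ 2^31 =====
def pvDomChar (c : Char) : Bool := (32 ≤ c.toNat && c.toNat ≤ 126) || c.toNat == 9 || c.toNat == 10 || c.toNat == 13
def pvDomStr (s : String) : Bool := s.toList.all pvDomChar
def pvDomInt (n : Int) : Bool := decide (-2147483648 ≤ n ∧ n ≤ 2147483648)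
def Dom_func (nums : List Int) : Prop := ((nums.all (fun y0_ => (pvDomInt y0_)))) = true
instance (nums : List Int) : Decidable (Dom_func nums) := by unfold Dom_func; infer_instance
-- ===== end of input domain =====

-- B replaces A's fused running-sum loop by a prefix-sum table plus a separate counting scan (alternative decomposition, same cost).


-- ===== PORT A =====
def func (nums : List Int) : Int :=
  (nums.foldl (fun st num =>
      ((if num > st.2 then st.1 + 1 else st.1), st.2 + num)) ((0 : Int), (0 : Int))).1

-- ===== PORT B =====
-- prefix[-1] + num appended at each step, transliterated as structural recursion carrying the last prefix value
def buildPrefix : List Int → Int → List Int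
  | [], _ => []
  | num :: rest, last => (last + num) :: buildPrefix rest (last + num)

def func_alt (nums : List Int) : Int :=
  let pfx := (0 : Int) :: buildPrefix nums 0
  (((pfx.zip nums).countP (fun p => decide (p.2 > p.1))) : Int)

-- ===== PRECONDITION & SPEC =====
def Spec_func (nums : List Int) (out : Int) : Prop := out = func_alt nums
instance (nums : List Int) (out : Int) : Decidable (Spec_func nums out) := by unfold Spec_func; infer_instance

-- ===== CLAIM (what is proved, stated in full; the proofs are below) =====
def Claim_equal_func : Prop := ∀ (nums : List Int), Dom_func nums → Spec_func nums (func nums)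

-- ===== LEMMAS AND PROOFS =====
theorem func_loop (nums : List Int) (c s : Int) :
    (nums.foldl (fun st num =>
        ((if num > st.2 then st.1 + 1 else st.1), st.2 + num)) (c, s)).1
      = c + (((s :: buildPrefix nums s).zip nums).countP (fun p => decide (p.2 > p.1)) : Int) := by
  induction nums generalizing c s with
  | nil => simp
  | cons num rest ih =>
    simp only [List.foldl, buildPrefix, List.zip_cons_cons, List.countP_cons]
    rw [ih]
    by_cases h : num > s <;> simp [h] <;> ring


-- ===== VERDICT (by name: the statement is the Claim_ definition above) =====
theorem func_spec : Claim_equal_func := by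
  intro nums _
  show func nums = func_alt nums
  unfold func func_alt
  rw [func_loop]
  simp
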